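-- pv_equiv track=rewrite | github.com/jacks14235/audio-visualizer | server.py | get_wall_indices
-- ===== SOURCE A (Python) =====
-- def get_wall_indices(size, gap):
--     indices = []
--     gaps = []
--     count = 0
--     for i in range(size):
--         if i % 2 == 0:
--             # up
--             curr = size - i - 1
--             inc = size
--         else:
--             # down
--             curr = size * size - (i + 1)
--             inc = -size
--         for _ in range(size):
--             indices.append(curr)
--             curr += inc
--             count += 1
--         if i != size -1:
--             for _ in range(gap):
--                 indices.append(0)
--                 gaps.append(count)
--                 count += 1
--     return indices, gaps
-- ===== SOURCE B (Python) =====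
-- def get_wall_indices(size, gap):
--     n = max(size, 0)
--     g = max(gap, 0)
--     period = n + g
--     total = n * n + (n - 1) * g if n > 0 else 0
--     indices = []
--     gaps = []
--     for p in range(total):
--         i, off = divmod(p, period)
--         if off < n:
--             r = off if i % 2 == 0 else n - 1 - off
--             indices.append(r * n + (n - 1 - i))
--         else:
--             indices.append(0)
--             gaps.append(p)
--     return indices, gaps
-- ===== Notes on version B (the rewrite author's own statement) =====
-- stated objective: alternative
-- what changed: B replaces A's nested column/row loops with threaded curr/inc/count accumulators by a single flat loop over output positions that decodes each position p with divmod(p, size+gap) into (column, offset) and emits the serpentine value or a gap entry directly.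
import Mathlib
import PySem

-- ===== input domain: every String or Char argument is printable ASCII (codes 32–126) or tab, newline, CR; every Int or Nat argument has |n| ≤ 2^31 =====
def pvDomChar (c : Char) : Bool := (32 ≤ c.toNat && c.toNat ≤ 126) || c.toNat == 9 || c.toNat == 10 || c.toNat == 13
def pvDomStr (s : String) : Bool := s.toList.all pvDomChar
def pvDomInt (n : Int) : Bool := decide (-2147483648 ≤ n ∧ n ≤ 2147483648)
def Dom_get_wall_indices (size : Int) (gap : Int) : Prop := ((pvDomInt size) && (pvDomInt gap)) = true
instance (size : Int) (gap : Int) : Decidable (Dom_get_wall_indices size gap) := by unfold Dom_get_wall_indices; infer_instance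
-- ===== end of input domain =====

-- B replaces A's nested loops with threaded curr/inc/count accumulators by a single flat loop
-- over output positions, decoding each position with divmod into (column, offset) (objective: alternative).

-- ===== PORT A =====
def get_wall_indices (size : Int) (gap : Int) : List Int × List Int :=
  let st :=
    (PySem.List.pyRange 0 size 1).foldl
      (fun (st : List Int × List Int × Int) i =>
        let ci : Int × Int :=
          if PySem.Int.mod i 2 = 0 then (size - i - 1, size)
          else (size * size - (i + 1), -size)
        let st2 :=
          (PySem.List.pyRange 0 size 1).foldl
            (fun (s2 : List Int × Int × Int) _ =>
              (s2.1 ++ [s2.2.1], s2.2.1 + ci.2, s2.2.2 + 1))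
            (st.1, ci.1, st.2.2)
        let st3 : List Int × List Int × Int := (st2.1, st.2.1, st2.2.2)
        if i ≠ size - 1 then
          (PySem.List.pyRange 0 gap 1).foldl
            (fun (s3 : List Int × List Int × Int) _ =>
              (s3.1 ++ [(0 : Int)], s3.2.1 ++ [s3.2.2], s3.2.2 + 1))
            st3
        else st3)
      ([], [], 0)
  (st.1, st.2.1)

-- ===== PORT B =====
def get_wall_indices_alt (size : Int) (gap : Int) : List Int × List Int :=
  let n := max size 0
  let g := max gap 0
  let period := n + g
  let total := if n > 0 then n * n + (n - 1) * g else 0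
  (PySem.List.pyRange 0 total 1).foldl
    (fun (st : List Int × List Int) p =>
      let i := PySem.Int.floordiv p period
      let off := PySem.Int.mod p period
      if off < n then
        let r := if PySem.Int.mod i 2 = 0 then off else n - 1 - off
        (st.1 ++ [r * n + (n - 1 - i)], st.2)
      else
        (st.1 ++ [(0 : Int)], st.2 ++ [p]))
    ([], [])

-- ===== PRECONDITION & SPEC =====
def Spec_get_wall_indices (size : Int) (gap : Int) (out : List Int × List Int) : Prop := out = get_wall_indices_alt size gap
instance (size : Int) (gap : Int) (out : List Int × List Int) : Decidable (Spec_get_wall_indices size gap out) := by unfold Spec_get_wall_indices; infer_instance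

-- ===== CLAIM (what is proved, stated in full; the proofs are below) =====
def Claim_equal_get_wall_indices : Prop := ∀ (size : Int) (gap : Int), Dom_get_wall_indices size gap → Spec_get_wall_indices size gap (get_wall_indices size gap)

-- ===== LEMMAS AND PROOFS =====

-- B's step function, and A's loop body rephrased as a per-column step ("bridge"): helpers for the proofs only.
def fstep (n period : Int) (st : List Int × List Int) (p : Int) : List Int × List Int :=
  let i := PySem.Int.floordiv p period
  let off := PySem.Int.mod p period
  if off < n then
    let r := if PySem.Int.mod i 2 = 0 then off else n - 1 - off
    (st.1 ++ [r * n + (n - 1 - i)], st.2)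
  else
    (st.1 ++ [(0 : Int)], st.2 ++ [p])

def bstep (size gap : Int) (st : List Int × List Int) (i : Int) : List Int × List Int :=
  if i ≠ size - 1 then
    (st.1 ++ (if PySem.Int.mod i 2 = 0 then PySem.List.pyRange 0 size 1
        else (PySem.List.pyRange 0 size 1).reverse).map (fun r => r * size + (size - 1 - i))
      ++ PySem.List.pyRepeat [0] gap,
     st.2 ++ (PySem.List.pyRange 0 gap 1).map (fun g => (i + 1) * size + i * gap + g))
  else
    (st.1 ++ (if PySem.Int.mod i 2 = 0 then PySem.List.pyRange 0 size 1
        else (PySem.List.pyRange 0 size 1).reverse).map (fun r => r * size + (size - 1 - i)), st.2)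

theorem altE (size gap : Int) :
    get_wall_indices_alt size gap
      = (PySem.List.pyRange 0
          (if max size 0 > 0 then max size 0 * max size 0 + (max size 0 - 1) * max gap 0 else 0) 1).foldl
          (fstep (max size 0) (max size 0 + max gap 0)) ([], []) := rfl

theorem t1 (n : Nat) :
    ((List.range n).map (fun (k : Nat) => (k : Int))).reverse
      = (List.range n).map (fun (k : Nat) => ((n - 1 - k : Nat) : Int)) := by
  rw [← List.map_reverse, List.range_eq_range', List.reverse_range', ← List.range_eq_range',
      List.map_map]
  apply List.map_congr_left
  intro r hr
  simp

theorem rangeInt (b : Int) :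
    PySem.List.pyRange 0 b 1 = (List.range b.toNat).map (fun (k : Nat) => (k : Int)) := by
  rw [PySem.List.pyRange_one]
  simp

theorem innerA (inc : Int) : ∀ (L : List Int) (ind : List Int) (curr cnt : Int),
    L.foldl (fun (s2 : List Int × Int × Int) _ =>
        (s2.1 ++ [s2.2.1], s2.2.1 + inc, s2.2.2 + 1)) (ind, curr, cnt)
      = (ind ++ (List.range L.length).map (fun (r : Nat) => curr + inc * (r : Int)),
         curr + inc * L.length, cnt + L.length) := by
  intro L
  induction L with
  | nil => intro ind curr cnt; simp
  | cons a t ih =>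
    intro ind curr cnt
    rw [List.foldl_cons, ih, List.length_cons]
    refine Prod.ext ?_ (Prod.ext ?_ ?_)
    · show ind ++ [curr] ++ _ = ind ++ _
      rw [List.append_assoc, List.singleton_append, List.range_succ_eq_map,
          List.map_cons, List.map_map]
      have h0 : curr + inc * ((0 : Nat) : Int) = curr := by norm_num
      rw [h0]
      apply congrArg
      apply congrArg
      apply List.map_congr_left
      intro r _
      simp only [Function.comp_apply, Nat.succ_eq_add_one]
      push_cast; ring
    · show curr + inc + inc * (t.length : Int) = _
      push_cast; ring
    · show cnt + 1 + (t.length : Int) = _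
      push_cast; ring

theorem gapA : ∀ (L : List Int) (ind gp : List Int) (cnt : Int),
    L.foldl (fun (s3 : List Int × List Int × Int) _ =>
        (s3.1 ++ [(0 : Int)], s3.2.1 ++ [s3.2.2], s3.2.2 + 1)) (ind, gp, cnt)
      = (ind ++ List.replicate L.length 0,
         gp ++ (List.range L.length).map (fun (g : Nat) => cnt + (g : Int)), cnt + L.length) := by
  intro L
  induction L with
  | nil => intro ind gp cnt; simp
  | cons a t ih =>
    intro ind gp cnt
    rw [List.foldl_cons, ih, List.length_cons]
    refine Prod.ext ?_ (Prod.ext ?_ ?_)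
    · show ind ++ [0] ++ _ = ind ++ _
      rw [List.append_assoc, List.singleton_append, List.replicate_succ]
    · show gp ++ [cnt] ++ _ = gp ++ _
      rw [List.append_assoc, List.singleton_append, List.range_succ_eq_map,
          List.map_cons, List.map_map]
      have h0 : cnt + ((0 : Nat) : Int) = cnt := by norm_num
      rw [h0]
      apply congrArg
      apply congrArg
      apply List.map_congr_left
      intro r _
      simp only [Function.comp_apply, Nat.succ_eq_add_one]
      push_cast; ring
    · show cnt + 1 + (t.length : Int) = _
      push_cast; ring

theorem invariant (size gap : Int) (hs : 0 < size) (n : Nat) (hn : n ≤ size.toNat) :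
    (((List.range n).map (fun (k : Nat) => (k : Int))).foldl
      (fun (st : List Int × List Int × Int) i =>
        let ci : Int × Int :=
          if PySem.Int.mod i 2 = 0 then (size - i - 1, size)
          else (size * size - (i + 1), -size)
        let st2 :=
          (PySem.List.pyRange 0 size 1).foldl
            (fun (s2 : List Int × Int × Int) _ =>
              (s2.1 ++ [s2.2.1], s2.2.1 + ci.2, s2.2.2 + 1))
            (st.1, ci.1, st.2.2)
        let st3 : List Int × List Int × Int := (st2.1, st.2.1, st2.2.2)
        if i ≠ size - 1 then
          (PySem.List.pyRange 0 gap 1).foldl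
            (fun (s3 : List Int × List Int × Int) _ =>
              (s3.1 ++ [(0 : Int)], s3.2.1 ++ [s3.2.2], s3.2.2 + 1))
            st3
        else st3)
      ([], [], 0))
    = (let b := ((List.range n).map (fun (k : Nat) => (k : Int))).foldl
        (bstep size gap) ([], [])
       (b.1, b.2, if n = size.toNat then (n : Int) * size + ((n : Int) - 1) * (gap.toNat : Int)
                  else (n : Int) * size + (n : Int) * (gap.toNat : Int))) := by
  have hsz : ((size.toNat : Nat) : Int) = size := Int.toNat_of_nonneg hs.le
  induction n with
  | zero =>
    have h0 : (0 : Nat) ≠ size.toNat := by omega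
    simp [h0]
  | succ n ih =>
    have hnN : n < size.toNat := by omega
    have ihv := ih (by omega)
    rw [List.range_succ, List.map_append, List.map_singleton,
        List.foldl_append, List.foldl_append, ihv, List.foldl_cons, List.foldl_nil,
        List.foldl_cons, List.foldl_nil]
    have hnn : n ≠ size.toNat := by omega
    simp only [if_neg hnn]
    set b := ((List.range n).map (fun (k : Nat) => (k : Int))).foldl
        (bstep size gap) ([], []) with hb
    have hlen : (PySem.List.pyRange 0 size 1).length = size.toNat := by
      rw [rangeInt]; simp
    have hlenG : (PySem.List.pyRange 0 gap 1).length = gap.toNat := by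
      rw [rangeInt]; simp
    have hrowE : (List.range size.toNat).map
          (fun (r : Nat) => (size - (n : Int) - 1) + size * (r : Int))
        = (PySem.List.pyRange 0 size 1).map (fun r => r * size + (size - 1 - (n : Int))) := by
      rw [rangeInt, List.map_map]
      apply List.map_congr_left
      intro r _
      simp only [Function.comp_apply]
      ring
    have hrowO : (List.range size.toNat).map
          (fun (r : Nat) => (size * size - ((n : Int) + 1)) + (-size) * (r : Int))
        = ((PySem.List.pyRange 0 size 1).reverse).map
            (fun r => r * size + (size - 1 - (n : Int))) := by
      rw [rangeInt, t1, List.map_map]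
      apply List.map_congr_left
      intro r hr
      simp only [Function.comp_apply, List.mem_range] at *
      have hc : ((size.toNat - 1 - r : Nat) : Int) = size - 1 - (r : Int) := by omega
      rw [hc]
      ring
    by_cases hpar : PySem.Int.mod (n : Int) 2 = 0
    · simp only [bstep, if_pos hpar, innerA, gapA, hlen, hlenG, hrowE]
      by_cases hlast : (n : Int) ≠ size - 1
      · have hlast2 : ¬ (n + 1 = size.toNat) := by omega
        simp only [if_pos hlast, if_neg hlast2, PySem.List.pyRepeat_singleton]
        refine Prod.ext rfl (Prod.ext ?_ ?_)
        · show b.2 ++ _ = b.2 ++ _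
          apply congrArg
          rw [rangeInt gap, List.map_map]
          apply List.map_congr_left
          intro g hg
          simp only [Function.comp_apply, List.mem_range] at *
          have hg2 : ((gap.toNat : Nat) : Int) = gap := by omega
          rw [hsz, hg2]
          ring
        · show ((n : Int) * size + (n : Int) * (gap.toNat : Int) + (size.toNat : Int) + (gap.toNat : Int) : Int) = _
          rw [hsz]; push_cast; ring
      · have hlast2 : n + 1 = size.toNat := by omega
        simp only [if_neg hlast, if_pos hlast2]
        refine Prod.ext rfl (Prod.ext rfl ?_)
        show ((n : Int) * size + (n : Int) * (gap.toNat : Int) + (size.toNat : Int) : Int) = _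
        rw [hsz]; push_cast; ring
    · simp only [bstep, if_neg hpar, innerA, gapA, hlen, hlenG, hrowO]
      by_cases hlast : (n : Int) ≠ size - 1
      · have hlast2 : ¬ (n + 1 = size.toNat) := by omega
        simp only [if_pos hlast, if_neg hlast2, PySem.List.pyRepeat_singleton]
        refine Prod.ext rfl (Prod.ext ?_ ?_)
        · show b.2 ++ _ = b.2 ++ _
          apply congrArg
          rw [rangeInt gap, List.map_map]
          apply List.map_congr_left
          intro g hg
          simp only [Function.comp_apply, List.mem_range] at *
          have hg2 : ((gap.toNat : Nat) : Int) = gap := by omega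
          rw [hsz, hg2]
          ring
        · show ((n : Int) * size + (n : Int) * (gap.toNat : Int) + (size.toNat : Int) + (gap.toNat : Int) : Int) = _
          rw [hsz]; push_cast; ring
      · have hlast2 : n + 1 = size.toNat := by omega
        simp only [if_neg hlast, if_pos hlast2]
        refine Prod.ext rfl (Prod.ext rfl ?_)
        show ((n : Int) * size + (n : Int) * (gap.toNat : Int) + (size.toNat : Int) : Int) = _
        rw [hsz]; push_cast; ring

-- div/mod decoding of a flat position inside block m
theorem decodeDiv (P p m : Int) (hP : 0 < P) (h1 : m * P ≤ p) (h2 : p < (m + 1) * P) :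
    PySem.Int.floordiv p P = m ∧ PySem.Int.mod p P = p - m * P := by
  have hd : PySem.Int.floordiv p P = m :=
    (PySem.Int.floordiv_eq_iff_of_pos hP).2 ⟨h1, h2⟩
  refine ⟨hd, ?_⟩
  have := PySem.Int.floordiv_mul_add_mod p P
  rw [hd] at this
  omega

-- value part of block m: the fstep fold over the first `n` positions of the block
theorem Vpart (n g m : Int) (hn : 0 < n) (hg : 0 ≤ g) (ind gp : List Int) :
    (PySem.List.pyRange (m * (n + g)) (m * (n + g) + n) 1).foldl (fstep n (n + g)) (ind, gp)
      = (ind ++ (if PySem.Int.mod m 2 = 0 then PySem.List.pyRange 0 n 1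
                 else (PySem.List.pyRange 0 n 1).reverse).map (fun r => r * n + (n - 1 - m)), gp) := by
  have hP : 0 < n + g := by omega
  have hcong : ∀ p ∈ PySem.List.pyRange (m * (n + g)) (m * (n + g) + n) 1, ∀ st : List Int × List Int,
      fstep n (n + g) st p
        = (st.1 ++ [(if PySem.Int.mod m 2 = 0 then p - m * (n + g) else n - 1 - (p - m * (n + g))) * n
              + (n - 1 - m)], st.2) := by
    intro p hp st
    rw [PySem.List.mem_pyRange_one] at hp
    obtain ⟨hd, hm⟩ := decodeDiv (n + g) p m hP (by omega) (by nlinarith [hp.1, hp.2])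
    unfold fstep
    rw [hd, hm, if_pos (by omega)]
  rw [PySem.List.foldl_congr_mem' _ _ _ _ hcong,
      PySem.List.foldl_prod_mk
        (f := fun acc p => acc ++ [(if PySem.Int.mod m 2 = 0 then p - m * (n + g)
              else n - 1 - (p - m * (n + g))) * n + (n - 1 - m)])
        (g := fun acc _ => acc),
      PySem.List.foldl_append_singleton_eq_map, List.foldl_fixed]
  refine Prod.ext ?_ rfl
  show ind ++ _ = ind ++ _
  apply congrArg
  by_cases hpar : PySem.Int.mod m 2 = 0
  · simp only [if_pos hpar]
    rw [rangeInt n, PySem.List.pyRange_one, List.map_map, List.map_map]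
    have hln : (m * (n + g) + n - m * (n + g)).toNat = n.toNat := by omega
    rw [hln]
    apply List.map_congr_left
    intro k _
    simp only [Function.comp_apply]
    ring
  · simp only [if_neg hpar]
    rw [rangeInt n, t1, PySem.List.pyRange_one, List.map_map, List.map_map]
    have hln : (m * (n + g) + n - m * (n + g)).toNat = n.toNat := by omega
    rw [hln]
    apply List.map_congr_left
    intro k hk
    simp only [Function.comp_apply, List.mem_range] at *
    have hc : ((n.toNat - 1 - k : Nat) : Int) = n - 1 - (k : Int) := by omega
    rw [hc]
    have : m * (n + g) + (k : Int) - m * (n + g) = (k : Int) := by ring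
    rw [this]
  
-- gap part of block m: the fstep fold over the remaining `g` positions of the block
theorem Zpart (n g m : Int) (hn : 0 < n) (hg : 0 ≤ g) (ind gp : List Int) :
    (PySem.List.pyRange (m * (n + g) + n) ((m + 1) * (n + g)) 1).foldl (fstep n (n + g)) (ind, gp)
      = (ind ++ List.replicate g.toNat 0,
         gp ++ PySem.List.pyRange (m * (n + g) + n) ((m + 1) * (n + g)) 1) := by
  have hP : 0 < n + g := by omega
  have hcong : ∀ p ∈ PySem.List.pyRange (m * (n + g) + n) ((m + 1) * (n + g)) 1, ∀ st : List Int × List Int,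
      fstep n (n + g) st p = (st.1 ++ [(0 : Int)], st.2 ++ [p]) := by
    intro p hp st
    rw [PySem.List.mem_pyRange_one] at hp
    obtain ⟨hd, hm⟩ := decodeDiv (n + g) p m hP (by nlinarith [hp.1]) (by omega)
    unfold fstep
    rw [hd, hm, if_neg (by omega)]
  rw [PySem.List.foldl_congr_mem' _ _ _ _ hcong,
      PySem.List.foldl_prod_mk
        (f := fun acc _ => acc ++ [(0 : Int)])
        (g := fun acc p => acc ++ [p]),
      PySem.List.foldl_append_singleton_eq_map, PySem.List.foldl_append_singleton_eq_self]
  refine Prod.ext ?_ rfl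
  show ind ++ _ = ind ++ _
  apply congrArg
  rw [List.map_const', PySem.List.length_pyRange_one]
  have : ((m + 1) * (n + g) - (m * (n + g) + n)).toNat = g.toNat := by
    have : (m + 1) * (n + g) - (m * (n + g) + n) = g := by ring
    rw [this]
  rw [this]

-- main bridge ↔ flat invariant: after m columns, the flat fold has consumed exactly cons m positions
theorem inv2 (size gap : Int) (hs : 0 < size) (m : Nat) (hm : m ≤ size.toNat) :
    (PySem.List.pyRange 0
        (if m = size.toNat then size * size + (size - 1) * max gap 0 else (m : Int) * (size + max gap 0)) 1).foldl
      (fstep size (size + max gap 0)) ([], [])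
      = (PySem.List.pyRange 0 (m : Int) 1).foldl (bstep size gap) ([], []) := by
  set g := max gap 0 with hgdef
  have hg : 0 ≤ g := le_max_right _ _
  induction m with
  | zero =>
    have h0 : (0 : Nat) ≠ size.toNat := by omega
    simp only [h0, if_false, Nat.cast_zero, zero_mul]
    rfl
  | succ m ih =>
    have hmN : m < size.toNat := by omega
    have hmne : m ≠ size.toNat := by omega
    have ihv := ih (by omega)
    rw [if_neg hmne] at ihv
    have hc1 : (0 : Int) ≤ (m : Int) * (size + g) := by positivity
    have hc2 : (m : Int) * (size + g) ≤ (m : Int) * (size + g) + size := by omega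
    have hc3 : (m : Int) * (size + g) + size ≤ ((m : Int) + 1) * (size + g) := by nlinarith
    have hrhs : PySem.List.pyRange 0 ((m + 1 : Nat) : Int) 1
        = PySem.List.pyRange 0 (m : Int) 1 ++ [(m : Int)] := by
      rw [show ((m + 1 : Nat) : Int) = (m : Int) + 1 by push_cast; ring,
          PySem.List.pyRange_one_succ_right (by positivity)]
    have hgaps : PySem.List.pyRange ((m : Int) * (size + g) + size) (((m : Int) + 1) * (size + g)) 1
        = (PySem.List.pyRange 0 gap 1).map
            (fun gg => ((m : Int) + 1) * size + (m : Int) * gap + gg) := by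
      by_cases hga : 0 ≤ gap
      · have hge : g = gap := max_eq_left hga
        rw [PySem.List.pyRange_one, PySem.List.pyRange_one, List.map_map,
            show (((m : Int) + 1) * (size + g) - ((m : Int) * (size + g) + size)) = gap - 0 by
              rw [hge]; ring]
        apply List.map_congr_left
        intro k _
        simp only [Function.comp_apply]
        rw [hge]; ring
      · have hge : g = 0 := by omega
        rw [PySem.List.pyRange_one_eq_nil (le_of_eq (by rw [hge]; ring)),
            PySem.List.pyRange_one_eq_nil (by omega : gap ≤ 0), List.map_nil]
    by_cases hlast : m + 1 = size.toNat
    · have hmi : (m : Int) = size - 1 := by omega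
      have hbound : size * size + (size - 1) * g = (m : Int) * (size + g) + size := by
        rw [hmi]; ring
      have hstep : ∀ st : List Int × List Int, bstep size gap st (m : Int)
          = (st.1 ++ (if PySem.Int.mod (m : Int) 2 = 0 then PySem.List.pyRange 0 size 1
              else (PySem.List.pyRange 0 size 1).reverse).map
                (fun r => r * size + (size - 1 - (m : Int))), st.2) := by
        intro st
        unfold bstep
        rw [if_neg (by omega)]
      rw [if_pos hlast, hbound,
          PySem.List.pyRange_one_append 0 ((m : Int) * (size + g)) ((m : Int) * (size + g) + size)
            hc1 hc2,
          List.foldl_append, ihv, Vpart size g (m : Int) hs hg,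
          hrhs, List.foldl_append, List.foldl_cons, List.foldl_nil, hstep]
    · have hmi : (m : Int) ≠ size - 1 := by omega
      have hstep : ∀ st : List Int × List Int, bstep size gap st (m : Int)
          = (st.1 ++ (if PySem.Int.mod (m : Int) 2 = 0 then PySem.List.pyRange 0 size 1
              else (PySem.List.pyRange 0 size 1).reverse).map
                (fun r => r * size + (size - 1 - (m : Int)))
              ++ PySem.List.pyRepeat [0] gap,
             st.2 ++ (PySem.List.pyRange 0 gap 1).map
                (fun gg => ((m : Int) + 1) * size + (m : Int) * gap + gg)) := by
        intro st
        unfold bstep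
        rw [if_pos hmi]
      rw [if_neg hlast,
          show ((m + 1 : Nat) : Int) * (size + g) = ((m : Int) + 1) * (size + g) by push_cast; ring,
          PySem.List.pyRange_one_append 0 ((m : Int) * (size + g)) (((m : Int) + 1) * (size + g))
            hc1 (le_trans hc2 hc3),
          List.foldl_append,
          PySem.List.pyRange_one_append ((m : Int) * (size + g)) ((m : Int) * (size + g) + size)
            (((m : Int) + 1) * (size + g)) hc2 hc3,
          List.foldl_append, ihv, Vpart size g (m : Int) hs hg, Zpart size g (m : Int) hs hg,
          hrhs, List.foldl_append, List.foldl_cons, List.foldl_nil, hstep]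
      refine Prod.ext ?_ ?_
      · show _ ++ List.replicate g.toNat 0 = _ ++ PySem.List.pyRepeat [0] gap
        rw [PySem.List.pyRepeat_singleton]
        have hge : g.toNat = gap.toNat := by omega
        rw [hge]
      · show _ ++ PySem.List.pyRange ((m : Int) * (size + g) + size) (((m : Int) + 1) * (size + g)) 1
            = _ ++ _
        rw [hgaps]

-- ===== VERDICT (by name: the statement is the Claim_ definition above) =====
theorem get_wall_indices_spec : Claim_equal_get_wall_indices := by
  unfold Claim_equal_get_wall_indices Spec_get_wall_indices
  intro size gap _
  by_cases hs : 0 < size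
  · have h := invariant size gap hs size.toNat le_rfl
    rw [← rangeInt size] at h
    have hsz : ((size.toNat : Nat) : Int) = size := Int.toNat_of_nonneg hs.le
    have h2 := inv2 size gap hs size.toNat le_rfl
    rw [if_pos rfl, hsz] at h2
    have hmax : max size 0 = size := max_eq_left hs.le
    rw [altE, hmax, if_pos hs, h2]
    unfold get_wall_indices
    simp only [h]
  · have hmax : max size 0 = 0 := max_eq_right (by omega)
    rw [altE, hmax]
    unfold get_wall_indices
    rw [PySem.List.pyRange_one_eq_nil (by omega : size ≤ (0 : Int))]
    simp
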